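-- pv_equiv track=rewrite | github.com/YoonJae00/BookBuddy | ai/utils/text_splitter.py | split_by_chapters
-- ===== SOURCE A (Python) =====
-- from typing import List
--
-- def split_by_chapters(text: str) -> List[str]:
--     """챕터 단위로 분할"""
--     # 챕터 구분자는 소설 형식에 따라 조정 필요
--     chapter_markers = [
--         "Chapter", "제", "장", "CHAPTER",
--         # 추가 구분자...
--     ]
--
--     chapters = []
--     current_chapter = ""
--
--     for line in text.split('\n'):
--         if any(marker in line for marker in chapter_markers):
--             if current_chapter:
--                 chapters.append(current_chapter.strip())
--             current_chapter = line + '\n'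
--         else:
--             current_chapter += line + '\n'
--
--     if current_chapter:
--         chapters.append(current_chapter.strip())
--
--     return chapters
-- ===== SOURCE B (Python) =====
-- from typing import List
--
-- def split_by_chapters(text: str) -> List[str]:
--     """챕터 단위로 분할 — slice whole segments at the next marker index instead of accumulating a string line by line."""
--     chapter_markers = [
--         "Chapter", "제", "장", "CHAPTER",
--     ]
--
--     def is_marker(line: str) -> bool:
--         return any(marker in line for marker in chapter_markers)
--
--     lines = text.split('\n')
--     chapters = []
--     while lines:
--         # the current chapter starts at lines[0]; cut just before the next marker line
--         j = next((j for j in range(1, len(lines)) if is_marker(lines[j])), len(lines))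
--         chapters.append('\n'.join(lines[:j]).strip())
--         lines = lines[j:]
--     return chapters
-- ===== Notes on version B (the rewrite author's own statement) =====
-- stated objective: alternative
-- what changed: B finds the next marker line's index and slices/joins whole chapter segments in a while loop, instead of A's line-by-line string accumulator with an emit-on-marker flush.
import Mathlib
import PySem

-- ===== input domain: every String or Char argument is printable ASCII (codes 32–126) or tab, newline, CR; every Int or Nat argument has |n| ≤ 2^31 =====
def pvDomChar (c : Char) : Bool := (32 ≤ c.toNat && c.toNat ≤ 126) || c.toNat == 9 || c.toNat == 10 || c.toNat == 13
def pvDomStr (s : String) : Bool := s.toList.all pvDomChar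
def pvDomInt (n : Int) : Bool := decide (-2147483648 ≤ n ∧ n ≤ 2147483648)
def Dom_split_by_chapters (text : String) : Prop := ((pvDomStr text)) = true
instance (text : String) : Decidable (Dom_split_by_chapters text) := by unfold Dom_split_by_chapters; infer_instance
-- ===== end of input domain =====

-- B slices whole chapter segments at the next marker index and joins them, instead of A's line-by-line string accumulator; alternative decomposition, same cost.


-- ===== PORT A =====
-- the marker list and the `any(marker in line …)` test, shared verbatim by both Pythons
def pvMarkers : List (List Char) := ["Chapter".toList, "제".toList, "장".toList, "CHAPTER".toList]

def pvIsMarker (line : List Char) : Bool := pvMarkers.any (fun m => PySem.Chars.isIn m line)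

-- the `for line in lines:` loop of A, state = (chapters, current_chapter)
def pvALoop : List (List Char) → List (List Char) → List Char → List (List Char) × List Char
  | [], chapters, cur => (chapters, cur)
  | l :: ls, chapters, cur =>
    if pvIsMarker l then
      pvALoop ls (if cur.isEmpty then chapters else chapters ++ [PySem.Chars.strip cur]) (l ++ ['\n'])
    else
      pvALoop ls chapters (cur ++ l ++ ['\n'])

def split_by_chapters (text : String) : List String :=
  let lines := (PySem.Chars.split? text.toList ['\n']).getD []
  let r := pvALoop lines [] []
  (if r.2.isEmpty then r.1 else r.1 ++ [PySem.Chars.strip r.2]).map String.mk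

-- ===== PORT B =====
-- `'\n'.join(seg).strip()` of Source B
def pvRender (seg : List (List Char)) : List Char := PySem.Chars.strip (PySem.Chars.join ['\n'] seg)

-- the `while lines:` loop of Source B: find the next marker at index ≥ 1, cut there, slice the rest off
def pvBLoop (lines : List (List Char)) (chapters : List (List Char)) : List (List Char) :=
  if hne : lines = [] then chapters
  else
    let j : Nat := match (lines.drop 1).findIdx? pvIsMarker with
      | some k => k + 1
      | none => lines.length
    pvBLoop (lines.drop j) (chapters ++ [pvRender (lines.take j)])
termination_by lines.length
decreasing_by
  have hl := List.length_pos_iff.mpr hne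
  cases h : (lines.drop 1).findIdx? pvIsMarker with
  | some k => simp only [h, List.length_drop]; omega
  | none => simp only [h, List.length_drop]; omega

def split_by_chapters_alt (text : String) : List String :=
  (pvBLoop ((PySem.Chars.split? text.toList ['\n']).getD []) []).map String.mk

-- ===== PRECONDITION & SPEC =====
def Spec_split_by_chapters (text : String) (out : List String) : Prop := out = split_by_chapters_alt text
instance (text : String) (out : List String) : Decidable (Spec_split_by_chapters text out) := by unfold Spec_split_by_chapters; infer_instance

-- ===== CLAIM (what is proved, stated in full; the proofs are below) =====
def Claim_equal_split_by_chapters : Prop := ∀ (text : String), Dom_split_by_chapters text → Spec_split_by_chapters text (split_by_chapters text)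

-- ===== LEMMAS AND PROOFS =====

-- `current_chapter` after accumulating the lines `seg`: each line followed by '\n'
def pvCat (seg : List (List Char)) : List Char := (seg.map (· ++ ['\n'])).flatten

-- A's result from chapters = [] and current_chapter = cur
def pvA (ls : List (List Char)) (cur : List Char) : List (List Char) :=
  let r := pvALoop ls [] cur
  if r.2.isEmpty then r.1 else r.1 ++ [PySem.Chars.strip r.2]

-- accumulator-free version of pvBLoop
def pvBPure (lines : List (List Char)) : List (List Char) :=
  if hne : lines = [] then []
  else
    let j : Nat := match (lines.drop 1).findIdx? pvIsMarker with
      | some k => k + 1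
      | none => lines.length
    pvRender (lines.take j) :: pvBPure (lines.drop j)
termination_by lines.length
decreasing_by
  have hl := List.length_pos_iff.mpr hne
  cases h : (lines.drop 1).findIdx? pvIsMarker with
  | some k => simp only [h, List.length_drop]; omega
  | none => simp only [h, List.length_drop]; omega

lemma pvBLoop_eq_pure_aux :
    ∀ (n : Nat) (lines : List (List Char)), lines.length ≤ n →
      ∀ acc, pvBLoop lines acc = acc ++ pvBPure lines := by
  intro n
  induction n with
  | zero =>
    intro lines hl acc
    have h0 : lines = [] := by cases lines with
      | nil => rfl
      | cons a b => simp at hl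
    rw [h0, pvBLoop, pvBPure]; simp
  | succ n ih =>
    intro lines hl acc
    by_cases hne : lines = []
    · rw [hne, pvBLoop, pvBPure]; simp
    · rw [pvBLoop, pvBPure]
      simp only [hne, dite_false]
      have hj : 1 ≤ (match (lines.drop 1).findIdx? pvIsMarker with
          | some k => k + 1 | none => lines.length) := by
        cases h : (lines.drop 1).findIdx? pvIsMarker with
        | some k => simp
        | none => simpa using List.length_pos_iff.mpr hne
      have hlen : (lines.drop (match (lines.drop 1).findIdx? pvIsMarker with
          | some k => k + 1 | none => lines.length)).length ≤ n := by
        have := List.length_pos_iff.mpr hne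
        simp only [List.length_drop]
        omega
      rw [ih _ hlen]
      simp

lemma pvBLoop_eq_pure (lines : List (List Char)) (acc : List (List Char)) :
    pvBLoop lines acc = acc ++ pvBPure lines :=
  pvBLoop_eq_pure_aux lines.length lines le_rfl acc

lemma pvBPure_cons (l : List Char) (tl : List (List Char)) :
    pvBPure (l :: tl) =
      match tl.findIdx? pvIsMarker with
      | none => [pvRender (l :: tl)]
      | some k => pvRender (l :: tl.take k) :: pvBPure (tl.drop k) := by
  rw [pvBPure]
  simp only [List.drop_succ_cons, List.drop_zero, reduceDIte, List.cons_ne_self]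
  cases h : tl.findIdx? pvIsMarker with
  | none =>
    simp only [h]
    rw [pvBPure]
    simp [List.take_of_length_le (by simp : (l :: tl).length ≤ (l :: tl).length),
      List.drop_of_length_le (by simp : (l :: tl).length ≤ (l :: tl).length)]
  | some k => simp [h]

lemma pvALoop_acc (ls : List (List Char)) :
    ∀ ch cur, pvALoop ls ch cur = (ch ++ (pvALoop ls [] cur).1, (pvALoop ls [] cur).2) := by
  induction ls with
  | nil => intro ch cur; simp [pvALoop]
  | cons l tl ih =>
    intro ch cur
    rw [pvALoop, pvALoop]
    split_ifs with hm hc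
    · exact ih ch (l ++ ['\n'])
    · rw [ih (ch ++ [PySem.Chars.strip cur]), ih ([] ++ [PySem.Chars.strip cur])]
      simp
    · exact ih ch (cur ++ l ++ ['\n'])

lemma pvCat_append_one (seg : List (List Char)) (l : List Char) :
    pvCat seg ++ l ++ ['\n'] = pvCat (seg ++ [l]) := by
  simp [pvCat]

lemma pvCat_ne_nil (seg : List (List Char)) (h : seg ≠ []) : pvCat seg ≠ [] := by
  cases seg with
  | nil => exact absurd rfl h
  | cons a tl => simp [pvCat]

lemma rstrip_newline (z : List Char) :
    PySem.Chars.rstrip (z ++ ['\n']) = PySem.Chars.rstrip z := by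
  simp [PySem.Chars.rstrip, List.dropWhile_cons, show PySem.Chars.isspace '\n' = true from by decide]

lemma strip_newline (x : List Char) :
    PySem.Chars.strip (x ++ ['\n']) = PySem.Chars.strip x := by
  simp only [PySem.Chars.strip, PySem.Chars.lstrip, List.dropWhile_append]
  split_ifs with h
  · simp only [List.isEmpty_iff] at h
    simp [h, List.dropWhile_cons, show PySem.Chars.isspace '\n' = true from by decide,
      PySem.Chars.rstrip]
  · exact rstrip_newline _

lemma cat_eq_join (seg : List (List Char)) (h : seg ≠ []) :
    pvCat seg = PySem.Chars.join ['\n'] seg ++ ['\n'] := by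
  induction seg with
  | nil => exact absurd rfl h
  | cons a tl ih =>
    cases tl with
    | nil => simp [pvCat, PySem.Chars.join_singleton]
    | cons b rest =>
      rw [PySem.Chars.join_cons_cons]
      have : pvCat (a :: b :: rest) = (a ++ ['\n']) ++ pvCat (b :: rest) := by simp [pvCat]
      rw [this, ih (by simp)]
      simp

lemma strip_cat (seg : List (List Char)) (h : seg ≠ []) :
    PySem.Chars.strip (pvCat seg) = pvRender seg := by
  rw [cat_eq_join seg h, strip_newline, pvRender]

lemma pvA_cons (l : List Char) (tl : List (List Char)) (cur : List Char) :
    pvA (l :: tl) cur =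
      if pvIsMarker l then
        (if cur.isEmpty then pvA tl (l ++ ['\n'])
         else PySem.Chars.strip cur :: pvA tl (l ++ ['\n']))
      else pvA tl (cur ++ l ++ ['\n']) := by
  unfold pvA
  rw [pvALoop]
  split_ifs with hm hc
  · simp [hc]
  · rw [pvALoop_acc]
    simp only [hc, if_false]
    split_ifs <;> simp
  · rfl

lemma pvA_key (ls : List (List Char)) :
    ∀ seg, seg ≠ [] →
      pvA ls (pvCat seg) =
        match ls.findIdx? pvIsMarker with
        | none => [pvRender (seg ++ ls)]
        | some k => pvRender (seg ++ ls.take k) :: pvBPure (ls.drop k) := by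
  induction ls with
  | nil =>
    intro seg h
    simp only [List.findIdx?_nil, List.append_nil]
    unfold pvA pvALoop
    simp [List.isEmpty_iff, pvCat_ne_nil seg h, strip_cat seg h]
  | cons l tl ih =>
    intro seg h
    rw [pvA_cons]
    by_cases hm : pvIsMarker l
    · have hseg : (pvCat seg).isEmpty = false := by
        simp [List.isEmpty_iff, pvCat_ne_nil seg h]
      have hl : l ++ ['\n'] = pvCat [l] := by simp [pvCat]
      rw [hl] at *
      simp only [hm, if_true, hseg, Bool.false_eq_true, if_false]
      rw [ih [l] (by simp), strip_cat seg h]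
      rw [List.findIdx?_cons, hm, if_pos rfl]
      cases hf : tl.findIdx? pvIsMarker with
      | none => simp [hf, pvBPure_cons]
      | some k => simp [hf, pvBPure_cons]
    · have hl : pvCat seg ++ l ++ ['\n'] = pvCat (seg ++ [l]) := pvCat_append_one seg l
      simp only [hm, Bool.false_eq_true, if_false]
      rw [hl, ih (seg ++ [l]) (by simp)]
      rw [List.findIdx?_cons, if_neg (by simp [hm])]
      cases hf : tl.findIdx? pvIsMarker with
      | none => simp [hf]
      | some k => simp [hf]

lemma go_ne_nil (sep : List Char) :
    ∀ (fuel : Nat) (l cur : List Char) (acc : List (List Char)),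
      PySem.Chars.splitOn.go sep fuel l cur acc ≠ [] := by
  intro fuel
  induction fuel with
  | zero => intro l cur acc; simp [PySem.Chars.splitOn.go]
  | succ n ih =>
    intro l cur acc
    cases l with
    | nil => simp [PySem.Chars.splitOn.go]
    | cons c rest =>
      rw [PySem.Chars.splitOn.go]
      split_ifs with hp
      · exact ih _ _ _
      · exact ih _ _ _

lemma split_ne_nil (s : List Char) : (PySem.Chars.split? s ['\n']).getD [] ≠ [] := by
  simp [PySem.Chars.split?, PySem.Chars.splitOn]
  exact go_ne_nil _ _ _ _ _

-- ===== VERDICT (by name: the statement is the Claim_ definition above) =====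
theorem split_by_chapters_spec : Claim_equal_split_by_chapters := by
  intro text _
  unfold Spec_split_by_chapters split_by_chapters split_by_chapters_alt
  have hne := split_ne_nil text.toList
  obtain ⟨l, tl, hlt⟩ := List.exists_cons_of_ne_nil hne
  rw [pvBLoop_eq_pure, List.nil_append, hlt]
  have hA : pvA (l :: tl) [] = pvBPure (l :: tl) := by
    have h1 : pvA (l :: tl) [] = pvA tl (pvCat [l]) := by
      rw [pvA_cons]
      split_ifs <;> simp_all [pvCat]
    rw [h1, pvA_key tl [l] (by simp), pvBPure_cons]
    cases hf : tl.findIdx? pvIsMarker with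
    | none => simp [hf]
    | some k => simp [hf]
  show List.map String.mk (pvA (l :: tl) []) = List.map String.mk (pvBPure (l :: tl))
  rw [hA]
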